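-- pv_equiv track=rewrite | github.com/shatteringlass/aoc25 | day01.py | part_one
-- ===== SOURCE A (Python) =====
-- def part_one(lines):
--     result = 0
--     pos = 50
--
--     for line in lines:
--         sgn = +1 if line[0] == "R" else -1
--         steps = int(line[1:])
--         pos += sgn * steps
--         pos %= 100
--         if pos == 0:
--             result += 1
--
--     return result
-- ===== SOURCE B (Python) =====
-- def part_one(lines):
--     # Parse once into signed deltas, then count zero positions by divide and
--     # conquer: positions in the right half only depend on the left half via
--     # its total shift, so each half is solved independently.
--     deltas = [(1 if line[0] == "R" else -1) * int(line[1:]) for line in lines]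
--
--     def go(ds, start):
--         # returns (how many running positions hit a multiple of 100, total shift)
--         if not ds:
--             return (0, 0)
--         if len(ds) == 1:
--             return (1 if (start + ds[0]) % 100 == 0 else 0, ds[0])
--         mid = len(ds) // 2
--         c1, s1 = go(ds[:mid], start)
--         c2, s2 = go(ds[mid:], start + s1)
--         return (c1 + c2, s1 + s2)
--
--     return go(deltas, 50)[0]
-- ===== Notes on version B (the rewrite author's own statement) =====
-- stated objective: alternative
-- what changed: A's fused linear loop (running position reduced mod 100 each step, counting zeros in-line) is replaced by a parse pass into signed deltas followed by a divide-and-conquer recursion: the list is split in half, each half counted independently, the right half's start shifted by the left half's total; correctness rests on mod distributing over sums so per-step reduction is unnecessary.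
import Mathlib
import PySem

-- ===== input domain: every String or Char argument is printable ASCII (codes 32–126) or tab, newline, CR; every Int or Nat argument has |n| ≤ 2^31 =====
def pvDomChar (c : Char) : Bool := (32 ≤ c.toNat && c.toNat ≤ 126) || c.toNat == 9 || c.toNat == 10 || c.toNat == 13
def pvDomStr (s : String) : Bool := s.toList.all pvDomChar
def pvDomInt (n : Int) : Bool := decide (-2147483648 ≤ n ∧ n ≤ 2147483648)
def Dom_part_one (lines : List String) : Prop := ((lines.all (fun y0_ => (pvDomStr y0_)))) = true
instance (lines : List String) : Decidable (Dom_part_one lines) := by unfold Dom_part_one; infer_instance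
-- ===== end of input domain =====

-- B replaces A's fused linear mod-and-count loop by a parse pass into signed deltas
-- plus a divide-and-conquer count over halves; same result, different decomposition.

-- ===== PORT A =====
-- one iteration of A's loop; the Option threads Python's IndexError/ValueError
def part_one_step (st : Option (Int × Int)) (line : String) : Option (Int × Int) :=
  match st with
  | none => none
  | some (result, pos) =>
    match PySem.Str.pyGet? line 0 with
    | none => none                              -- line[0] : IndexError
    | some c =>
      let sgn : Int := if c = 'R' then 1 else -1
      match PySem.Int.ofStr? (PySem.Str.slice line (some 1) none) with
      | none => none                            -- int(line[1:]) : ValueError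
      | some steps =>
        let pos' := PySem.Int.mod (pos + sgn * steps) 100
        some (if pos' = 0 then result + 1 else result, pos')

def part_one (lines : List String) : Int :=
  match lines.foldl part_one_step (some (0, 50)) with
  | some (result, _) => result
  | none => 0                                   -- unreachable under Pre_

-- ===== PORT B =====
-- (1 if line[0] == "R" else -1) * int(line[1:])
def part_one_parse? (line : String) : Option Int :=
  match PySem.Str.pyGet? line 0 with
  | none => none
  | some c =>
    (PySem.Int.ofStr? (PySem.Str.slice line (some 1) none)).map
      (fun n => (if c = 'R' then 1 else -1) * n)

-- the comprehension building `deltas` (none if any line raises)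
def part_one_parseAll? (lines : List String) : Option (List Int) :=
  match lines with
  | [] => some []
  | l :: ls =>
    match part_one_parse? l, part_one_parseAll? ls with
    | some d, some ds => some (d :: ds)
    | _, _ => none

-- Source B's `go`: divide and conquer, returns (zero-count, total shift)
def part_one_go (ds : List Int) (start : Int) : Int × Int :=
  match h : ds with
  | [] => (0, 0)
  | [d] => (if PySem.Int.mod (start + d) 100 = 0 then 1 else 0, d)
  | _ :: _ :: _ =>
    let mid := ds.length / 2
    let l := part_one_go (ds.take mid) start
    let r := part_one_go (ds.drop mid) (start + l.2)
    (l.1 + r.1, l.2 + r.2)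
termination_by ds.length
decreasing_by
  · simp [h, List.length_take]; omega
  · simp [h]; omega

def part_one_alt (lines : List String) : Int :=
  match part_one_parseAll? lines with
  | none => 0                                   -- unreachable under Pre_
  | some deltas => (part_one_go deltas 50).1

-- ===== PRECONDITION & SPEC =====
-- excluded: inputs where A raises — an empty line (IndexError) or a line whose tail is
-- not an int literal (ValueError)
def Pre_part_one (lines : List String) : Prop :=
  ∀ l ∈ lines, (PySem.Str.pyGet? l 0).isSome
    ∧ (PySem.Int.ofStr? (PySem.Str.slice l (some 1) none)).isSome
instance (lines : List String) : Decidable (Pre_part_one lines) := by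
  unfold Pre_part_one; infer_instance

def pvWitness_part_one : List String := ["R50", "L7"]

def Spec_part_one (lines : List String) (out : Int) : Prop := out = part_one_alt lines
instance (lines : List String) (out : Int) : Decidable (Spec_part_one lines out) := by
  unfold Spec_part_one; infer_instance

-- ===== CLAIM (what is proved, stated in full; the proofs are below) =====
def Claim_equal_part_one : Prop :=
  ∀ (lines : List String), Dom_part_one lines → Pre_part_one lines →
    Spec_part_one lines (part_one lines)

-- ===== LEMMAS AND PROOFS =====

-- reference characterisation both ports are reduced to: the running positions
def pvAccum (pos : Int) (ds : List Int) : List Int :=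
  match h : ds with
  | [] => []
  | d :: rest => (pos + d) :: pvAccum (pos + d) rest

lemma pvAccum_append (xs ys : List Int) (p : Int) :
    pvAccum p (xs ++ ys) = pvAccum p xs ++ pvAccum (p + xs.sum) ys := by
  induction xs generalizing p with
  | nil => simp [pvAccum]
  | cons x xs ih => simp [pvAccum, ih, add_assoc]

-- Python's `%` with positive modulus absorbs an already-reduced summand
lemma part_one_mod_shift (p d : Int) :
    PySem.Int.mod (PySem.Int.mod p 100 + d) 100 = PySem.Int.mod (p + d) 100 := by
  have h : (0:Int) < 100 := by norm_num
  simp only [PySem.Int.mod_eq_emod_of_pos h]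
  omega

-- B's divide and conquer computes (count of zero positions, sum of deltas)
lemma part_one_go_eq (ds : List Int) (start : Int) :
    part_one_go ds start =
      (((pvAccum start ds).countP (fun q => PySem.Int.mod q 100 == 0) : Int), ds.sum) := by
  induction ds, start using part_one_go.induct with
  | case1 start => simp [part_one_go, pvAccum]
  | case2 start d =>
    by_cases hz : PySem.Int.mod (start + d) 100 = 0 <;>
      · simp only [part_one_go, pvAccum, List.countP_cons, List.countP_nil, List.sum_cons,
          List.sum_nil, add_zero, beq_iff_eq, hz, if_true, if_false]
        norm_num
  | case3 start a b rest _mid _l ihl _ ihr =>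
    have hm : _mid = (a :: b :: rest).length / 2 := rfl
    have hl : _l = part_one_go (List.take _mid (a :: b :: rest)) start := rfl
    rw [hl, ihl] at ihr
    rw [hm] at ihl ihr
    dsimp only at ihr
    rw [part_one_go, ihl]
    dsimp only
    rw [ihr]
    have hsplit : a :: b :: rest =
        (a :: b :: rest).take ((a :: b :: rest).length / 2)
          ++ (a :: b :: rest).drop ((a :: b :: rest).length / 2) := by
      simp
    conv_rhs => rw [hsplit]
    rw [pvAccum_append, List.countP_append, List.sum_append]
    push_cast
    simp

-- loop invariant: A's fold from a reduced position = counted zeros of the positions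
lemma part_one_fold_eq (ls : List String) (ds : List Int)
    (h : part_one_parseAll? ls = some ds) (r p : Int) :
    ls.foldl part_one_step (some (r, PySem.Int.mod p 100)) =
      some (r + ((pvAccum p ds).countP (fun q => PySem.Int.mod q 100 == 0) : Int),
            PySem.Int.mod (p + ds.sum) 100) := by
  induction ls generalizing ds r p with
  | nil =>
    simp [part_one_parseAll?] at h
    subst h
    simp [pvAccum]
  | cons l ls ih =>
    simp only [part_one_parseAll?] at h
    cases hg : PySem.Str.pyGet? l 0 with
    | none =>
      simp only [part_one_parse?, hg] at h
      cases part_one_parseAll? ls <;> simp at h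
    | some c =>
      cases ho : PySem.Int.ofStr? (PySem.Str.slice l (some 1) none) with
      | none =>
        simp only [part_one_parse?, hg, ho, Option.map_none] at h
        cases part_one_parseAll? ls <;> simp at h
      | some n =>
        cases hrest : part_one_parseAll? ls with
        | none => simp [hrest] at h
        | some ds' =>
          simp only [part_one_parse?, hg, ho, hrest, Option.map_some] at h
          obtain rfl : ((if c = 'R' then (1:Int) else -1) * n) :: ds' = ds := by
            injection h
          simp only [List.foldl_cons, part_one_step, hg, ho]
          rw [part_one_mod_shift]
          rw [ih ds' hrest _ (p + (if c = 'R' then (1:Int) else -1) * n)]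
          simp only [pvAccum, List.countP_cons, List.sum_cons,
            Option.some.injEq, Prod.mk.injEq]
          constructor
          · by_cases hz :
              PySem.Int.mod (p + (if c = 'R' then (1:Int) else -1) * n) 100 = 0 <;>
              · simp only [hz, if_true, if_false, beq_iff_eq]
                push_cast
                ring
          · rw [add_assoc]

-- Pre_ makes every line parse
lemma part_one_parseAll_isSome (lines : List String) (hpre : Pre_part_one lines) :
    ∃ ds, part_one_parseAll? lines = some ds := by
  induction lines with
  | nil => exact ⟨[], rfl⟩
  | cons l ls ih =>
    obtain ⟨h1, h2⟩ := hpre l (List.mem_cons_self ..)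
    obtain ⟨c, hc⟩ := Option.isSome_iff_exists.mp h1
    obtain ⟨n, hn⟩ := Option.isSome_iff_exists.mp h2
    obtain ⟨ds, hds⟩ := ih (fun x hx => hpre x (List.mem_cons_of_mem _ hx))
    refine ⟨((if c = 'R' then (1:Int) else -1) * n) :: ds, ?_⟩
    simp only [part_one_parseAll?, part_one_parse?, hc, hn, hds, Option.map_some]

-- ===== VERDICT (by name: the statement is the Claim_ definition above) =====
theorem part_one_spec : Claim_equal_part_one := by
  intro lines _ hpre
  obtain ⟨ds, hds⟩ := part_one_parseAll_isSome lines hpre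
  unfold Spec_part_one
  have halt : part_one_alt lines = (part_one_go ds 50).1 := by
    unfold part_one_alt; rw [hds]
  rw [halt, part_one_go_eq]
  unfold part_one
  rw [show (some ((0:Int), (50:Int))) = some ((0:Int), PySem.Int.mod 50 100) from by decide]
  rw [part_one_fold_eq lines ds hds 0 50]
  simp
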